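-- pv_equiv track=rewrite | github.com/BAMDH/Cosas_Uni | Taller programación/Proyecto/proyecto0/agregar_billetes_cajero_existente.py | agregar_billete_aux
-- ===== SOURCE A (Python) =====
-- def agregar_billete_aux(cien,cincuenta,veinte,diez,cinco,dos,uno,billetes100,billetes50,billetes20,billetes10,billetes5,billetes2,billetes1):
--     #Entonces si en la entrada en los numeros de denominacion(cien, cincuenta, Veinte, etc...) lee un numero que no sea 0 se ejecuta el if de esa denominacion para añadir los billetes a las variables del archivo
--     if cien !=0:
--       billetes100 = billetes100+cien
--       cien= cien-cien
--       return agregar_billete_aux(cien,cincuenta,veinte,diez,cinco,dos,uno,billetes100,billetes50,billetes20,billetes10,billetes5,billetes2,billetes1)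
--
--     if cincuenta != 0:
--       billetes50 = billetes50+cincuenta
--       cincuenta= cincuenta-cincuenta
--       return agregar_billete_aux(cien,cincuenta,veinte,diez,cinco,dos,uno,billetes100,billetes50,billetes20,billetes10,billetes5,billetes2,billetes1)
--
--     if veinte !=0:
--       billetes20 = billetes20+veinte
--       veinte= veinte-veinte
--       return agregar_billete_aux(cien,cincuenta,veinte,diez,cinco,dos,uno,billetes100,billetes50,billetes20,billetes10,billetes5,billetes2,billetes1)
--
--     if diez !=0:
--       billetes10 = billetes10+diez
--       diez=diez-diez
--       return agregar_billete_aux(cien,cincuenta,veinte,diez,cinco,dos,uno,billetes100,billetes50,billetes20,billetes10,billetes5,billetes2,billetes1)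
--
--     if cinco !=0:
--       billetes5 = billetes5+cinco
--       cinco=cinco-cinco
--       return agregar_billete_aux(cien,cincuenta,veinte,diez,cinco,dos,uno,billetes100,billetes50,billetes20,billetes10,billetes5,billetes2,billetes1)
--
--     if dos !=0:
--       billetes2 = billetes2+dos
--       dos= dos-dos
--       return agregar_billete_aux(cien,cincuenta,veinte,diez,cinco,dos,uno,billetes100,billetes50,billetes20,billetes10,billetes5,billetes2,billetes1)
--     else:
--       billetes1= billetes1+uno
--       monto= (billetes100*100)+(billetes50*50)+(billetes20*20)+(billetes10*10)+(billetes5*5)+(billetes2*2)+billetes1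
--       #El la funcion retorna el resultado el cual sera un dicccionario con las denominacio de los billetes y los billetes que se añadira
--       resultado={"Cien":billetes100,"Cincuenta":billetes50,"Veinte":billetes20,"Diez":billetes10,"Cinco":billetes5,"Dos":billetes2,"Uno":billetes1, "Monto":monto }
--
--       return resultado
-- ===== SOURCE B (Python) =====
-- def agregar_billete_aux(cien,cincuenta,veinte,diez,cinco,dos,uno,billetes100,billetes50,billetes20,billetes10,billetes5,billetes2,billetes1):
--     # Straight-line: adding a count of 0 is a no-op on integers, so no guards
--     # and no recursion are needed.
--     b100 = billetes100 + cien
--     b50 = billetes50 + cincuenta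
--     b20 = billetes20 + veinte
--     b10 = billetes10 + diez
--     b5 = billetes5 + cinco
--     b2 = billetes2 + dos
--     b1 = billetes1 + uno
--     monto = b100*100 + b50*50 + b20*20 + b10*10 + b5*5 + b2*2 + b1
--     return {"Cien": b100, "Cincuenta": b50, "Veinte": b20, "Diez": b10,
--             "Cinco": b5, "Dos": b2, "Uno": b1, "Monto": monto}
-- ===== Notes on version B (the rewrite author's own statement) =====
-- stated objective: simpler
-- what changed: Replaces the six-way guarded tail recursion with straight-line code that adds every denomination count unconditionally and builds the result dict once (adding 0 is a no-op on integers).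
import Mathlib
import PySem

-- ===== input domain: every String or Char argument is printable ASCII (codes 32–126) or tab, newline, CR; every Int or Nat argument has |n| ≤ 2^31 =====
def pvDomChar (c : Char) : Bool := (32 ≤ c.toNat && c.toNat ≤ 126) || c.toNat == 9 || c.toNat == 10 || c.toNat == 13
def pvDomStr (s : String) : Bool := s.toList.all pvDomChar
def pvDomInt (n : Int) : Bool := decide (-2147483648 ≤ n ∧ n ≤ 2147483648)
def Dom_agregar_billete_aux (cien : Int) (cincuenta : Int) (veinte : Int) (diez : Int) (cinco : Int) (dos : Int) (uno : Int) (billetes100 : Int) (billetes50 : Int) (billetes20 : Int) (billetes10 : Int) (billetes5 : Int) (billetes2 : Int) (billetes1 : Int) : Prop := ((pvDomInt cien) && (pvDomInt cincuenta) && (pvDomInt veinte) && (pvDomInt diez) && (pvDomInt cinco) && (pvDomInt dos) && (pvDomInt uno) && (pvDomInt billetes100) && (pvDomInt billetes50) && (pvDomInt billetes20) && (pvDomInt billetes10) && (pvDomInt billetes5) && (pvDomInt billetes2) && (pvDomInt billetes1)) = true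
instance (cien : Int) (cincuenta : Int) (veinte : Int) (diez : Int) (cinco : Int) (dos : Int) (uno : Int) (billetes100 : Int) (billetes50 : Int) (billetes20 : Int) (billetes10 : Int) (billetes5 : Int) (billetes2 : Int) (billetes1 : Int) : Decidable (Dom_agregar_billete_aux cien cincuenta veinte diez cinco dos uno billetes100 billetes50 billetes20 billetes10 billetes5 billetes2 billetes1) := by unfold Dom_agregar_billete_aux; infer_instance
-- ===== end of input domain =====

-- ===== PORT A =====
-- B replaces A's guarded tail recursion with straight-line unconditional adds; return-value equivalence only.
def agregar_billete_aux (cien : Int) (cincuenta : Int) (veinte : Int) (diez : Int) (cinco : Int) (dos : Int) (uno : Int) (billetes100 : Int) (billetes50 : Int) (billetes20 : Int) (billetes10 : Int) (billetes5 : Int) (billetes2 : Int) (billetes1 : Int) : List (String × Int) :=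
  if cien ≠ 0 then
    agregar_billete_aux (cien - cien) cincuenta veinte diez cinco dos uno (billetes100 + cien) billetes50 billetes20 billetes10 billetes5 billetes2 billetes1
  else if cincuenta ≠ 0 then
    agregar_billete_aux cien (cincuenta - cincuenta) veinte diez cinco dos uno billetes100 (billetes50 + cincuenta) billetes20 billetes10 billetes5 billetes2 billetes1
  else if veinte ≠ 0 then
    agregar_billete_aux cien cincuenta (veinte - veinte) diez cinco dos uno billetes100 billetes50 (billetes20 + veinte) billetes10 billetes5 billetes2 billetes1
  else if diez ≠ 0 then
    agregar_billete_aux cien cincuenta veinte (diez - diez) cinco dos uno billetes100 billetes50 billetes20 (billetes10 + diez) billetes5 billetes2 billetes1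
  else if cinco ≠ 0 then
    agregar_billete_aux cien cincuenta veinte diez (cinco - cinco) dos uno billetes100 billetes50 billetes20 billetes10 (billetes5 + cinco) billetes2 billetes1
  else if dos ≠ 0 then
    agregar_billete_aux cien cincuenta veinte diez cinco (dos - dos) uno billetes100 billetes50 billetes20 billetes10 billetes5 (billetes2 + dos) billetes1
  else
    let billetes1' := billetes1 + uno
    let monto := (billetes100*100)+(billetes50*50)+(billetes20*20)+(billetes10*10)+(billetes5*5)+(billetes2*2)+billetes1'
    [("Cien", billetes100), ("Cincuenta", billetes50), ("Veinte", billetes20), ("Diez", billetes10), ("Cinco", billetes5), ("Dos", billetes2), ("Uno", billetes1'), ("Monto", monto)]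
termination_by (if cien = 0 then 0 else 1) + (if cincuenta = 0 then 0 else 1) + (if veinte = 0 then 0 else 1) + (if diez = 0 then 0 else 1) + (if cinco = 0 then 0 else 1) + (if dos = 0 then 0 else 1)
decreasing_by all_goals simp_all

-- ===== PORT B =====
def agregar_billete_aux_alt (cien : Int) (cincuenta : Int) (veinte : Int) (diez : Int) (cinco : Int) (dos : Int) (uno : Int) (billetes100 : Int) (billetes50 : Int) (billetes20 : Int) (billetes10 : Int) (billetes5 : Int) (billetes2 : Int) (billetes1 : Int) : List (String × Int) :=
  let b100 := billetes100 + cien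
  let b50 := billetes50 + cincuenta
  let b20 := billetes20 + veinte
  let b10 := billetes10 + diez
  let b5 := billetes5 + cinco
  let b2 := billetes2 + dos
  let b1 := billetes1 + uno
  let monto := b100*100 + b50*50 + b20*20 + b10*10 + b5*5 + b2*2 + b1
  [("Cien", b100), ("Cincuenta", b50), ("Veinte", b20), ("Diez", b10), ("Cinco", b5), ("Dos", b2), ("Uno", b1), ("Monto", monto)]

-- ===== PRECONDITION & SPEC =====
def Spec_agregar_billete_aux (cien : Int) (cincuenta : Int) (veinte : Int) (diez : Int) (cinco : Int) (dos : Int) (uno : Int) (billetes100 : Int) (billetes50 : Int) (billetes20 : Int) (billetes10 : Int) (billetes5 : Int) (billetes2 : Int) (billetes1 : Int) (out : List (String × Int)) : Prop := out = agregar_billete_aux_alt cien cincuenta veinte diez cinco dos uno billetes100 billetes50 billetes20 billetes10 billetes5 billetes2 billetes1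
instance (cien : Int) (cincuenta : Int) (veinte : Int) (diez : Int) (cinco : Int) (dos : Int) (uno : Int) (billetes100 : Int) (billetes50 : Int) (billetes20 : Int) (billetes10 : Int) (billetes5 : Int) (billetes2 : Int) (billetes1 : Int) (out : List (String × Int)) : Decidable (Spec_agregar_billete_aux cien cincuenta veinte diez cinco dos uno billetes100 billetes50 billetes20 billetes10 billetes5 billetes2 billetes1 out) := by unfold Spec_agregar_billete_aux; infer_instance

-- ===== CLAIM (what is proved, stated in full; the proofs are below) =====
def Claim_equal_agregar_billete_aux : Prop := ∀ (cien : Int) (cincuenta : Int) (veinte : Int) (diez : Int) (cinco : Int) (dos : Int) (uno : Int) (billetes100 : Int) (billetes50 : Int) (billetes20 : Int) (billetes10 : Int) (billetes5 : Int) (billetes2 : Int) (billetes1 : Int), Dom_agregar_billete_aux cien cincuenta veinte diez cinco dos uno billetes100 billetes50 billetes20 billetes10 billetes5 billetes2 billetes1 → Spec_agregar_billete_aux cien cincuenta veinte diez cinco dos uno billetes100 billetes50 billetes20 billetes10 billetes5 billetes2 billetes1 (agregar_billete_aux cien cincuenta veinte diez cinco dos uno billetes100 billetes50 billetes20 billetes10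 billetes5 billetes2 billetes1)

-- ===== LEMMAS AND PROOFS =====

theorem ab_base (uno billetes100 billetes50 billetes20 billetes10 billetes5 billetes2 billetes1 : Int) :
    agregar_billete_aux 0 0 0 0 0 0 uno billetes100 billetes50 billetes20 billetes10 billetes5 billetes2 billetes1 =
    [("Cien", billetes100), ("Cincuenta", billetes50), ("Veinte", billetes20), ("Diez", billetes10), ("Cinco", billetes5), ("Dos", billetes2), ("Uno", billetes1 + uno), ("Monto", (billetes100*100)+(billetes50*50)+(billetes20*20)+(billetes10*10)+(billetes5*5)+(billetes2*2)+(billetes1 + uno))] := by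
  rw [agregar_billete_aux]; simp

theorem ab_s1 (cien cincuenta veinte diez cinco dos uno billetes100 billetes50 billetes20 billetes10 billetes5 billetes2 billetes1 : Int) :
    agregar_billete_aux cien cincuenta veinte diez cinco dos uno billetes100 billetes50 billetes20 billetes10 billetes5 billetes2 billetes1 =
    agregar_billete_aux 0 cincuenta veinte diez cinco dos uno (billetes100 + cien) billetes50 billetes20 billetes10 billetes5 billetes2 billetes1 := by
  by_cases h : cien = 0
  · subst h; simp
  · conv_lhs => rw [agregar_billete_aux]
    simp [h]

theorem ab_s2 (cincuenta veinte diez cinco dos uno billetes100 billetes50 billetes20 billetes10 billetes5 billetes2 billetes1 : Int) :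
    agregar_billete_aux 0 cincuenta veinte diez cinco dos uno billetes100 billetes50 billetes20 billetes10 billetes5 billetes2 billetes1 =
    agregar_billete_aux 0 0 veinte diez cinco dos uno billetes100 (billetes50 + cincuenta) billetes20 billetes10 billetes5 billetes2 billetes1 := by
  by_cases h : cincuenta = 0
  · subst h; simp
  · conv_lhs => rw [agregar_billete_aux]
    simp [h]

theorem ab_s3 (veinte diez cinco dos uno billetes100 billetes50 billetes20 billetes10 billetes5 billetes2 billetes1 : Int) :
    agregar_billete_aux 0 0 veinte diez cinco dos uno billetes100 billetes50 billetes20 billetes10 billetes5 billetes2 billetes1 =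
    agregar_billete_aux 0 0 0 diez cinco dos uno billetes100 billetes50 (billetes20 + veinte) billetes10 billetes5 billetes2 billetes1 := by
  by_cases h : veinte = 0
  · subst h; simp
  · conv_lhs => rw [agregar_billete_aux]
    simp [h]

theorem ab_s4 (diez cinco dos uno billetes100 billetes50 billetes20 billetes10 billetes5 billetes2 billetes1 : Int) :
    agregar_billete_aux 0 0 0 diez cinco dos uno billetes100 billetes50 billetes20 billetes10 billetes5 billetes2 billetes1 =
    agregar_billete_aux 0 0 0 0 cinco dos uno billetes100 billetes50 billetes20 (billetes10 + diez) billetes5 billetes2 billetes1 := by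
  by_cases h : diez = 0
  · subst h; simp
  · conv_lhs => rw [agregar_billete_aux]
    simp [h]

theorem ab_s5 (cinco dos uno billetes100 billetes50 billetes20 billetes10 billetes5 billetes2 billetes1 : Int) :
    agregar_billete_aux 0 0 0 0 cinco dos uno billetes100 billetes50 billetes20 billetes10 billetes5 billetes2 billetes1 =
    agregar_billete_aux 0 0 0 0 0 dos uno billetes100 billetes50 billetes20 billetes10 (billetes5 + cinco) billetes2 billetes1 := by
  by_cases h : cinco = 0
  · subst h; simp
  · conv_lhs => rw [agregar_billete_aux]
    simp [h]

theorem ab_s6 (dos uno billetes100 billetes50 billetes20 billetes10 billetes5 billetes2 billetes1 : Int) :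
    agregar_billete_aux 0 0 0 0 0 dos uno billetes100 billetes50 billetes20 billetes10 billetes5 billetes2 billetes1 =
    agregar_billete_aux 0 0 0 0 0 0 uno billetes100 billetes50 billetes20 billetes10 billetes5 (billetes2 + dos) billetes1 := by
  by_cases h : dos = 0
  · subst h; simp
  · conv_lhs => rw [agregar_billete_aux]
    simp [h]

theorem agregar_billete_eq (cien cincuenta veinte diez cinco dos uno billetes100 billetes50 billetes20 billetes10 billetes5 billetes2 billetes1 : Int) :
    agregar_billete_aux cien cincuenta veinte diez cinco dos uno billetes100 billetes50 billetes20 billetes10 billetes5 billetes2 billetes1 =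
    agregar_billete_aux_alt cien cincuenta veinte diez cinco dos uno billetes100 billetes50 billetes20 billetes10 billetes5 billetes2 billetes1 := by
  rw [ab_s1, ab_s2, ab_s3, ab_s4, ab_s5, ab_s6, ab_base]
  simp [agregar_billete_aux_alt]

-- ===== VERDICT (by name: the statement is the Claim_ definition above) =====
theorem agregar_billete_aux_spec : Claim_equal_agregar_billete_aux := by
  intro cien cincuenta veinte diez cinco dos uno b100 b50 b20 b10 b5 b2 b1 _
  unfold Spec_agregar_billete_aux
  exact agregar_billete_eq cien cincuenta veinte diez cinco dos uno b100 b50 b20 b10 b5 b2 b1
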